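-- pv_equiv track=rewrite | github.com/Ander456/py_program | day142.py | f
-- ===== SOURCE A (Python) =====
-- def f(tasks, people):
--     # 为了更好的贪心我们先排序
--     tasks.sort()
--     people.sort()
--     ans = 0 # 最大可以完成的任务数量
--     i = j = 0 # 双指针
--     while j < len(tasks) and i < len(people):
--         if people[i] >= tasks[j]:
--             ans += 1
--             i += 1
--             j += 1
--         else:
--             i += 1
--     return ans
-- ===== SOURCE B (Python) =====
-- def f(tasks, people):
--     # Decision-procedure formulation: the greedy matching count equals the largest k
--     # such that the k strongest people can cover the k easiest tasks pairwise
--     # (people[n-k+i] >= tasks[i] for all i < k); find that k by binary search.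
--     tasks.sort()
--     people.sort()
--
--     def ok(k):
--         return all(people[len(people) - k + i] >= tasks[i] for i in range(k))
--
--     def search(lo, hi):
--         # invariant: ok(lo) holds and the answer is <= hi
--         if lo == hi:
--             return lo
--         mid = (lo + hi + 1) // 2
--         if ok(mid):
--             return search(mid, hi)
--         return search(lo, mid - 1)
--
--     return search(0, min(len(tasks), len(people)))
-- ===== Notes on version B (the rewrite author's own statement) =====
-- stated objective: alternative
-- what changed: B replaces A's constructive greedy matching sweep by a decision procedure: after sorting, it binary-searches the largest k for which the k strongest people pairwise cover the k easiest tasks (an all() check), instead of walking people with two pointers; the proved content is that the greedy count equals that maximal k.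
import Mathlib
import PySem

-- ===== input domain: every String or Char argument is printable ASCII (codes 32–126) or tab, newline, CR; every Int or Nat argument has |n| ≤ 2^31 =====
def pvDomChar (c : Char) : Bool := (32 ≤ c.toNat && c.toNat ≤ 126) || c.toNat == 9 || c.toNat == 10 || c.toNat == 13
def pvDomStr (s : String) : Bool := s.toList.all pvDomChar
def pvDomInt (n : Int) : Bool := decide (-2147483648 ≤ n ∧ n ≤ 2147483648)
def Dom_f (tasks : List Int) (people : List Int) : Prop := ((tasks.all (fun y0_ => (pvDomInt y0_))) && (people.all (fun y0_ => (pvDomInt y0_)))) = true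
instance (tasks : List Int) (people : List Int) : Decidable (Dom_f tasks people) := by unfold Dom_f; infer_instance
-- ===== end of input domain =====

-- B replaces A's greedy two-pointer sweep by a binary search for the largest k such that the
-- k strongest people pairwise cover the k easiest tasks; return-value equivalence only is
-- proved here — both Pythons sort their list arguments in place identically.

-- ===== PORT A =====
-- A's while loop: i walks people (always advances), j walks tasks (advances on a match);
-- ported as structural recursion on the people list, tasks consumed on a match
def fLoopA : List Int → List Int → Int
  | _, [] => 0
  | [], _ :: _ => 0
  | t :: ts, p :: ps => if p ≥ t then 1 + fLoopA ts ps else fLoopA (t :: ts) ps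

def f (tasks : List Int) (people : List Int) : Int :=
  fLoopA (PySem.List.sorted tasks (fun x => x) false) (PySem.List.sorted people (fun x => x) false)

-- ===== PORT B =====
-- Source B's ok(k): all(people[len(people)-k+i] >= tasks[i] for i in range(k)).
-- Every index used is in range on every call (0 ≤ i < k ≤ both lengths), so pyGetD with
-- default 0 is exact there.
def okB (T P : List Int) (k : Int) : Bool :=
  (PySem.List.pyRange 0 k 1).all
    (fun i => PySem.List.pyGetD T i 0 ≤ PySem.List.pyGetD P ((P.length : Int) - k + i) 0)

-- Source B's search(lo, hi). Python's base test is 'lo == hi'; search is only ever entered with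
-- lo ≤ hi (invariant of the recursion), so the guard is written 'hi ≤ lo' for termination.
def searchB (T P : List Int) (lo hi : Int) : Int :=
  if hi ≤ lo then lo
  else
    let mid := PySem.Int.floordiv (lo + hi + 1) 2
    if okB T P mid then searchB T P mid hi else searchB T P lo (mid - 1)
termination_by (hi - lo).toNat
decreasing_by
  · have h := PySem.Int.floordiv_two_mid_bounds (lo := lo + 1) (hi := hi) (by omega)
    have : lo + 1 + hi = lo + hi + 1 := by ring
    rw [this] at h
    omega
  · have h := PySem.Int.floordiv_two_mid_bounds (lo := lo + 1) (hi := hi) (by omega)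
    have : lo + 1 + hi = lo + hi + 1 := by ring
    rw [this] at h
    omega

def f_alt (tasks : List Int) (people : List Int) : Int :=
  let T := PySem.List.sorted tasks (fun x => x) false
  let P := PySem.List.sorted people (fun x => x) false
  searchB T P 0 (min (T.length : Int) (P.length : Int))

-- ===== PRECONDITION & SPEC =====
def Spec_f (tasks : List Int) (people : List Int) (out : Int) : Prop := out = f_alt tasks people
instance (tasks : List Int) (people : List Int) (out : Int) : Decidable (Spec_f tasks people out) := by unfold Spec_f; infer_instance

-- ===== CLAIM (what is proved, stated in full; the proofs are below) =====
def Claim_equal_f : Prop := ∀ (tasks : List Int) (people : List Int), Dom_f tasks people → Spec_f tasks people (f tasks people)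

-- ===== LEMMAS AND PROOFS =====

-- Nat-valued mirror of A's loop, for the combinatorial argument
def gA : List Int → List Int → Nat
  | _, [] => 0
  | [], _ :: _ => 0
  | t :: ts, p :: ps => if p ≥ t then 1 + gA ts ps else gA (t :: ts) ps

lemma fLoopA_eq_gA : ∀ (T P : List Int), fLoopA T P = (gA T P : Int) := by
  intro T P
  induction P generalizing T with
  | nil => cases T <;> rfl
  | cons p ps ih =>
      cases T with
      | nil => rfl
      | cons t ts =>
          by_cases h : p ≥ t
          · simp [fLoopA, gA, h, ih]
          · simp [fLoopA, gA, h, ih]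

lemma gA_nil_people (T : List Int) : gA T [] = 0 := by cases T <;> rfl

lemma gA_le_len_tasks : ∀ (T P : List Int), gA T P ≤ T.length := by
  intro T P
  induction P generalizing T with
  | nil => rw [gA_nil_people]; omega
  | cons p ps ih =>
      cases T with
      | nil => simp [gA]
      | cons t ts =>
          by_cases h : p ≥ t
          · simp only [gA, if_pos h, List.length_cons]
            have := ih ts; omega
          · simp only [gA, if_neg h]
            exact ih (t :: ts)

lemma gA_le_len_people : ∀ (T P : List Int), gA T P ≤ P.length := by
  intro T P
  induction P generalizing T with
  | nil => rw [gA_nil_people]; omega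
  | cons p ps ih =>
      cases T with
      | nil => simp [gA]
      | cons t ts =>
          by_cases h : p ≥ t
          · simp only [gA, if_pos h, List.length_cons]
            have := ih ts; omega
          · simp only [gA, if_neg h, List.length_cons]
            have := ih (t :: ts); omega

-- 'k tasks are coverable': some k people (as a sublist of P) pairwise dominate the first k tasks
def SubOk (T P : List Int) (k : Nat) : Prop :=
  k ≤ T.length ∧ ∃ Q, Q.Sublist P ∧ List.Forall₂ (· ≤ ·) (T.take k) Q

-- feasibility: the greedy count is coverable
lemma subOk_gA : ∀ (T P : List Int), SubOk T P (gA T P) := by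
  intro T P
  induction P generalizing T with
  | nil =>
      rw [gA_nil_people]
      exact ⟨by omega, [], List.nil_sublist _, by simp⟩
  | cons p ps ih =>
      cases T with
      | nil => exact ⟨by simp [gA], [], List.nil_sublist _, by simp [gA]⟩
      | cons t ts =>
          by_cases h : p ≥ t
          · obtain ⟨hlen, Q, hQ, hF⟩ := ih ts
            refine ⟨?_, p :: Q, hQ.cons₂ p, ?_⟩
            · simp only [gA, if_pos h, List.length_cons]; omega
            · simp only [gA, if_pos h, Nat.add_comm 1, List.take_succ_cons]
              exact List.Forall₂.cons h hF
          · obtain ⟨hlen, Q, hQ, hF⟩ := ih (t :: ts)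
            exact ⟨by simpa [gA, if_neg h] using hlen, Q, hQ.cons p, by simpa [gA, if_neg h] using hF⟩

-- optimality: any coverable k is at most the greedy count
lemma subOk_le_gA : ∀ (P T : List Int) (k : Nat), SubOk T P k → k ≤ gA T P := by
  intro P
  induction P with
  | nil =>
      intro T k ⟨hlen, Q, hQ, hF⟩
      have : Q = [] := List.sublist_nil.mp hQ
      subst this
      have := List.Forall₂.length_eq hF
      simp only [List.length_take, List.length_nil] at this
      omega
  | cons p ps ih =>
      intro T k ⟨hlen, Q, hQ, hF⟩
      match k with
      | 0 => omega
      | k' + 1 =>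
          match T with
          | [] => simp at hlen
          | t :: ts =>
              rw [List.take_succ_cons] at hF
              cases hF with
              | cons htq hF' =>
                rename_i q Q'
                by_cases h : p ≥ t
                · have hQ' : Q'.Sublist ps := by
                    rcases List.sublist_cons_iff.mp hQ with h1 | ⟨r, hr, hrs⟩
                    · exact (List.sublist_cons_self q Q').trans h1
                    · cases hr; exact hrs
                  have : k' ≤ gA ts ps :=
                    ih ts k' ⟨by simpa using hlen, Q', hQ', hF'⟩
                  simp only [gA, if_pos h]; omega
                · have hQps : (q :: Q').Sublist ps := by
                    rcases List.sublist_cons_iff.mp hQ with h1 | ⟨r, hr, hrs⟩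
                    · exact h1
                    · exfalso; cases hr; omega
                  have : k' + 1 ≤ gA (t :: ts) ps :=
                    ih (t :: ts) (k' + 1)
                      ⟨hlen, q :: Q', hQps, by rw [List.take_succ_cons]; exact hF'.cons htq⟩
                  simpa [gA, if_neg h] using this

-- coverability is downward closed
lemma subOk_mono (T P : List Int) {j k : Nat} (hjk : j ≤ k) (h : SubOk T P k) : SubOk T P j := by
  obtain ⟨hlen, Q, hQ, hF⟩ := h
  refine ⟨by omega, Q.take j, (Q.take_sublist j).trans hQ, ?_⟩
  have := List.forall₂_take j hF
  rwa [List.take_take, min_eq_left hjk] at this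

-- pointwise transitivity of Forall₂ (≤)
lemma forall₂_le_trans : ∀ {a b c : List Int},
    List.Forall₂ (· ≤ ·) a b → List.Forall₂ (· ≤ ·) b c → List.Forall₂ (· ≤ ·) a c := by
  intro a b c hab
  induction hab generalizing c with
  | nil => intro h; cases h; exact List.Forall₂.nil
  | cons hxy _ ih =>
      intro h
      cases h with
      | cons hyz hbc => exact List.Forall₂.cons (le_trans hxy hyz) (ih hbc)

-- a length-k sublist of an ascending list is pointwise dominated by its last k elements
lemma sublist_le_drop {Q P : List Int} (hQ : Q.Sublist P) (hP : P.Pairwise (· ≤ ·)) :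
    List.Forall₂ (· ≤ ·) Q (P.drop (P.length - Q.length)) := by
  induction hQ with
  | slnil => simp
  | @cons Q' ps a h ih =>
      have hlen : Q'.length ≤ ps.length := h.length_le
      have : ps.length + 1 - Q'.length = (ps.length - Q'.length) + 1 := by omega
      simp only [List.length_cons, this, List.drop_succ_cons]
      exact ih hP.tail
  | @cons₂ Q' ps a h ih =>
      have hlen : Q'.length ≤ ps.length := h.length_le
      rcases Nat.eq_or_lt_of_le hlen with heq | hlt
      · have : Q' = ps := h.eq_of_length heq
        subst this
        simp only [List.length_cons, Nat.sub_self, List.drop_zero]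
        exact List.forall₂_refl _
      · have harith : ps.length + 1 - (Q'.length + 1) = ps.length - Q'.length := by omega
        have hd : ps.length - Q'.length - 1 < ps.length := by omega
        have hdecomp := List.drop_eq_getElem_cons (l := ps) (i := ps.length - Q'.length - 1) hd
        have harith2 : ps.length - Q'.length - 1 + 1 = ps.length - Q'.length := by omega
        rw [harith2] at hdecomp
        have hdrop : (a :: ps).drop (ps.length - Q'.length) =
            ps[ps.length - Q'.length - 1] :: ps.drop (ps.length - Q'.length) :=
          calc (a :: ps).drop (ps.length - Q'.length)
              = (a :: ps).drop ((ps.length - Q'.length - 1) + 1) := by rw [harith2]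
            _ = ps.drop (ps.length - Q'.length - 1) := List.drop_succ_cons ..
            _ = ps[ps.length - Q'.length - 1] :: ps.drop (ps.length - Q'.length) := hdecomp
        simp only [List.length_cons, harith, hdrop]
        refine List.Forall₂.cons ?_ (ih hP.tail)
        exact (List.pairwise_cons.mp hP).1 _ (List.getElem_mem _)

-- on an ascending P, coverability of k equals domination by the top-k slice of P
lemma subOk_iff_drop (T P : List Int) (k : Nat) (hkT : k ≤ T.length) (_hkP : k ≤ P.length)
    (hP : P.Pairwise (· ≤ ·)) :
    SubOk T P k ↔ List.Forall₂ (· ≤ ·) (T.take k) (P.drop (P.length - k)) := by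
  constructor
  · rintro ⟨-, Q, hQ, hF⟩
    have hQlen : Q.length = k := by
      have := hF.length_eq
      simpa [List.length_take, min_eq_left hkT] using this.symm
    have := sublist_le_drop hQ hP
    rw [hQlen] at this
    exact forall₂_le_trans hF this
  · intro h
    exact ⟨hkT, P.drop (P.length - k), List.drop_sublist _ _, h⟩

-- Source B's ok(k) computes exactly that domination check
lemma okB_iff (T P : List Int) (k : Nat) (hkT : k ≤ T.length) (hkP : k ≤ P.length) :
    okB T P (k : Int) = true ↔
      List.Forall₂ (· ≤ ·) (T.take k) (P.drop (P.length - k)) := by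
  rw [okB, PySem.List.pyRange_zero_natCast, List.forall₂_iff_get]
  simp only [List.all_map, List.all_eq_true, List.mem_range, Function.comp,
    decide_eq_true_eq, List.length_take, List.length_drop, min_eq_left hkT]
  constructor
  · intro h
    refine ⟨by omega, ?_⟩
    intro i h1 h2
    have hik : i < k := by simpa [min_eq_left hkT] using h1
    have := h i hik
    rw [PySem.List.pyGetD_natCast] at this
    have hidx : (P.length : Int) - (k : Int) + (i : Int) = ((P.length - k + i : Nat) : Int) := by
      push_cast [Nat.cast_sub hkP]; ring
    rw [hidx, PySem.List.pyGetD_natCast] at this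
    have hTi : i < T.length := by omega
    have hPi : P.length - k + i < P.length := by omega
    simpa [List.getElem_take, List.getElem_drop, List.getD_eq_getElem?_getD,
      List.getElem?_eq_getElem, hTi, hPi] using this
  · rintro ⟨-, h⟩ i hik
    have hTi : i < T.length := by omega
    have hPi : P.length - k + i < P.length := by omega
    have := h i (by simpa [min_eq_left hkT] using hik) (by omega)
    rw [PySem.List.pyGetD_natCast]
    have hidx : (P.length : Int) - (k : Int) + (i : Int) = ((P.length - k + i : Nat) : Int) := by
      push_cast [Nat.cast_sub hkP]; ring
    rw [hidx, PySem.List.pyGetD_natCast]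
    simpa [List.getElem_take, List.getElem_drop, List.getD_eq_getElem?_getD,
      List.getElem?_eq_getElem, hTi, hPi] using this

-- ok(k) decides k ≤ greedy count, for k in range, on ascending P
lemma okB_iff_le_gA (T P : List Int) (hP : P.Pairwise (· ≤ ·)) (k : Int)
    (h0 : 0 ≤ k) (hkT : k ≤ (T.length : Int)) (hkP : k ≤ (P.length : Int)) :
    okB T P k = true ↔ k ≤ (gA T P : Int) := by
  obtain ⟨kn, rfl⟩ := Int.eq_ofNat_of_zero_le h0
  have hkT' : kn ≤ T.length := by exact_mod_cast hkT
  have hkP' : kn ≤ P.length := by exact_mod_cast hkP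
  rw [okB_iff T P kn hkT' hkP', ← subOk_iff_drop T P kn hkT' hkP' hP, Nat.cast_le]
  constructor
  · exact subOk_le_gA P T kn
  · intro h; exact subOk_mono T P h (subOk_gA T P)

-- the binary search homes in on the greedy count
lemma searchB_eq (T P : List Int) (hP : P.Pairwise (· ≤ ·)) :
    ∀ (n : Nat) (lo hi : Int), (hi - lo).toNat ≤ n →
      lo ≤ (gA T P : Int) → (gA T P : Int) ≤ hi →
      hi ≤ (T.length : Int) → hi ≤ (P.length : Int) → 0 ≤ lo →
      searchB T P lo hi = (gA T P : Int) := by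
  intro n
  induction n with
  | zero =>
      intro lo hi hn hlo hhi _ _ _
      rw [searchB, if_pos (by omega)]
      omega
  | succ n ih =>
      intro lo hi hn hlo hhi hT hp h0
      by_cases hle : hi ≤ lo
      · rw [searchB, if_pos hle]; omega
      · have hmid := PySem.Int.floordiv_two_mid_bounds (lo := lo + 1) (hi := hi) (by omega)
        have harr : lo + 1 + hi = lo + hi + 1 := by ring
        rw [harr] at hmid
        rw [searchB, if_neg hle]
        set mid := PySem.Int.floordiv (lo + hi + 1) 2 with hmiddef
        by_cases hok : okB T P mid = true
        · rw [if_pos hok]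
          have hmidle : mid ≤ (gA T P : Int) :=
            (okB_iff_le_gA T P hP mid (by omega) (by omega) (by omega)).mp hok
          exact ih mid hi (by omega) hmidle hhi hT hp (by omega)
        · rw [if_neg hok]
          have : ¬ mid ≤ (gA T P : Int) := fun hc =>
            hok ((okB_iff_le_gA T P hP mid (by omega) (by omega) (by omega)).mpr hc)
          exact ih lo (mid - 1) (by omega) hlo (by omega) (by omega) (by omega) h0

-- ===== VERDICT (by name: the statement is the Claim_ definition above) =====
theorem f_spec : Claim_equal_f := by
  intro tasks people _
  unfold Spec_f f f_alt
  set T := PySem.List.sorted tasks (fun x => x) false with hT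
  set P := PySem.List.sorted people (fun x => x) false with hPdef
  have hP : P.Pairwise (· ≤ ·) := by
    simpa using PySem.List.sorted_pairwise (xs := people) (key := fun x => x)
  have h1 := gA_le_len_tasks T P
  have h2 := gA_le_len_people T P
  rw [fLoopA_eq_gA]
  exact (searchB_eq T P hP ((min (T.length : Int) (P.length : Int)).toNat)
    0 (min (T.length : Int) (P.length : Int)) (by omega) (by omega)
    (by simp only [le_min_iff]; omega) (by omega) (by omega) (by omega)).symm
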